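-- pv_equiv track=rewrite | github.com/aloix123/Korepetycje | lekcje/permutacja.py | czy_n_permutacja
-- ===== SOURCE A (Python) =====
-- def tablica_zliczen(L):
--   m = max(L) # O(|L|)
--   W = [0 for _ in range(m+1)] # O(m)
--   for x in L: # O(|L|)
--     W[x] += 1
--   return W
--
-- def czy_n_permutacja(L, n):
--
--   if not (min(L)==1 and max(L)==n and len(L)==n):
--     return  False
--   w=tablica_zliczen(L)[1:]
--   for number in w:
--     if number!=1:
--       return  False
--   return True
-- ===== SOURCE B (Python) =====
-- def czy_n_permutacja(L, n):
--   if not (min(L) == 1 and max(L) == n and len(L) == n):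
--     return False
--   seen = [False] * n
--   for x in L:
--     if seen[x - 1]:
--       return False
--     seen[x - 1] = True
--   return True
-- ===== Notes on version B (the rewrite author's own statement) =====
-- stated objective: alternative
-- what changed: Replaces the build-a-full-count-table-then-scan-it pass with a single early-exiting pass over L that marks each value in a boolean array and bails out on the first repeat.
import Mathlib
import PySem

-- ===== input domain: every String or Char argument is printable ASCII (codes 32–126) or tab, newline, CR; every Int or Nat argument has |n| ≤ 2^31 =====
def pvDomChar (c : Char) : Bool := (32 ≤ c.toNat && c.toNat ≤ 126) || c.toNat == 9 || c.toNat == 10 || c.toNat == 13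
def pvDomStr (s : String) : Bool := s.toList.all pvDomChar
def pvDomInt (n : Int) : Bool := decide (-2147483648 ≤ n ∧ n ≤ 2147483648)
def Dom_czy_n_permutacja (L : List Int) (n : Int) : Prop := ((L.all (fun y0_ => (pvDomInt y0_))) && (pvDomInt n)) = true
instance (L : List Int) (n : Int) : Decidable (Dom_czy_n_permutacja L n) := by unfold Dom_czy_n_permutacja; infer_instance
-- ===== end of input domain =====

-- B replaces A's build-full-count-table-then-scan with one early-exiting pass marking a boolean array.

-- ===== PORT A =====
-- helper tablica_zliczen; only called when L ≠ [] and every x ∈ L is in range of W,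
-- so the getD/pyGetD/pySetD defaults are never taken at a call site.
def tablicaZliczen (L : List Int) : List Int :=
  let m := (PySem.List.max? L (fun y => y)).getD 0
  let W := (PySem.List.pyRange 0 (m + 1) 1).map (fun _ => (0 : Int))
  L.foldl (fun W x => PySem.List.pySetD W x (PySem.List.pyGetD W x 0 + 1)) W

-- 'for number in w: if number != 1: return False' then 'return True'
def czyLoopA : List Int → Bool
  | [] => true
  | number :: rest => if number ≠ 1 then false else czyLoopA rest

def czy_n_permutacja (L : List Int) (n : Int) : Bool :=
  match PySem.List.min? L (fun y => y), PySem.List.max? L (fun y => y) with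
  | some mn, some mx =>
    if ¬ (mn == 1 && mx == n && (L.length : Int) == n) then false
    else czyLoopA (PySem.List.slice (tablicaZliczen L) (some 1) none)
  | _, _ => false   -- unreachable: min()/max() raise ValueError on []; excluded by Pre_

-- ===== PORT B =====
-- 'for x in L: if seen[x-1]: return False; seen[x-1] = True' then 'return True'
-- (index x-1 is in range whenever the guard passed, so pyGetD/pySetD defaults never fire)
def czyLoopB : List Int → List Bool → Bool
  | [], _ => true
  | x :: rest, seen =>
    if PySem.List.pyGetD seen (x - 1) false then false
    else czyLoopB rest (PySem.List.pySetD seen (x - 1) true)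

def czy_n_permutacja_alt (L : List Int) (n : Int) : Bool :=
  match PySem.List.min? L (fun y => y) with
  | none => false   -- unreachable: min() raises ValueError on []; excluded by Pre_
  | some mn =>
    match PySem.List.max? L (fun y => y) with
    | none => false   -- unreachable as above
    | some mx =>
      if ¬ (mn == 1 && mx == n && (L.length : Int) == n) then false
      else czyLoopB L (List.replicate n.toNat false)

-- ===== PRECONDITION & SPEC =====
-- Pre_ excludes only the empty list, on which Python's min() raises ValueError (in both A and B).
def Pre_czy_n_permutacja (L : List Int) (n : Int) : Prop := L ≠ []
instance (L : List Int) (n : Int) : Decidable (Pre_czy_n_permutacja L n) := by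
  unfold Pre_czy_n_permutacja; infer_instance

def pvWitness_czy_n_permutacja : List Int × Int := ([2, 1, 3], 3)

def Spec_czy_n_permutacja (L : List Int) (n : Int) (out : Bool) : Prop := out = czy_n_permutacja_alt L n
instance (L : List Int) (n : Int) (out : Bool) : Decidable (Spec_czy_n_permutacja L n out) := by
  unfold Spec_czy_n_permutacja; infer_instance

-- ===== CLAIM (what is proved, stated in full; the proofs are below) =====
def Claim_equal_czy_n_permutacja : Prop := ∀ (L : List Int) (n : Int), Dom_czy_n_permutacja L n → Pre_czy_n_permutacja L n → Spec_czy_n_permutacja L n (czy_n_permutacja L n)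


-- ===== LEMMAS AND PROOFS =====

theorem czyLoopA_eq_true_iff (w : List Int) : czyLoopA w = true ↔ ∀ y ∈ w, y = 1 := by
  induction w with
  | nil => simp [czyLoopA]
  | cons a t ih => by_cases h : a = 1 <;> simp [czyLoopA, h, ih]

theorem foldl_step_length (M : List Int) :
    ∀ (W : List Int),
      (M.foldl (fun W x => PySem.List.pySetD W x (PySem.List.pyGetD W x 0 + 1)) W).length
        = W.length := by
  induction M with
  | nil => intro W; simp
  | cons a t ih =>
    intro W
    rw [List.foldl_cons, ih]
    exact PySem.List.length_pySetD _ _ _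

theorem mapconst_getD (l : List Int) : ∀ j : Nat, (l.map (fun _ => (0 : Int))).getD j 0 = 0 := by
  induction l with
  | nil => intro j; simp
  | cons a t ih =>
    intro j
    cases j with
    | zero => simp
    | succ j => simpa using ih j

theorem counts_spec (L : List Int) :
    ∀ (W : List Int), (∀ x ∈ L, 0 ≤ x ∧ x.toNat < W.length) →
    ∀ k : Nat, k < W.length →
      (L.foldl (fun W x => PySem.List.pySetD W x (PySem.List.pyGetD W x 0 + 1)) W).getD k 0 =
        W.getD k 0 + (L.count (k : Int) : Int) := by
  induction L with
  | nil => intro W _ k _; simp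
  | cons x t ih =>
    intro W hW k hk
    obtain ⟨hx0, hxlt⟩ := hW x (List.mem_cons_self ..)
    have hset : PySem.List.pySetD W x (PySem.List.pyGetD W x 0 + 1)
        = W.set x.toNat (W.getD x.toNat 0 + 1) := by
      rw [PySem.List.pySetD_of_nonneg W _ hx0, PySem.List.pyGetD_of_nonneg W 0 hx0]
    rw [List.foldl_cons, hset,
      ih (W.set x.toNat (W.getD x.toNat 0 + 1))
        (fun y hy => by
          have := hW y (List.mem_cons_of_mem _ hy)
          simpa [List.length_set] using this)
        k (by simpa [List.length_set] using hk)]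
    have hcnt : (List.count ((k : Nat) : Int) (x :: t) : Int)
        = (t.count ((k : Nat) : Int) : Int) + if x = ((k : Nat) : Int) then 1 else 0 := by
      simp only [List.count_cons, beq_iff_eq]
      split_ifs with h <;> push_cast <;> ring
    by_cases hkx : k = x.toNat
    · have h1 : (W.set x.toNat (W.getD x.toNat 0 + 1)).getD k 0 = W.getD x.toNat 0 + 1 := by
        rw [List.getD_eq_getElem?_getD, hkx, List.getElem?_set_self hxlt]
        rfl
      have hxk : x = ((k : Nat) : Int) := by omega
      rw [h1, hcnt, if_pos hxk]
      have h2 : W.getD k 0 = W.getD x.toNat 0 := by rw [hkx]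
      rw [h2]; ring
    · have hne : x.toNat ≠ k := fun h => hkx h.symm
      have h1 : (W.set x.toNat (W.getD x.toNat 0 + 1)).getD k 0 = W.getD k 0 := by
        rw [List.getD_eq_getElem?_getD, List.getElem?_set_ne hne, ← List.getD_eq_getElem?_getD]
      have hxk : ¬ x = ((k : Nat) : Int) := by omega
      rw [h1, hcnt, if_neg hxk]; ring

theorem czyLoopB_spec (L : List Int) :
    ∀ (seen : List Bool), (∀ x ∈ L, 1 ≤ x ∧ (x - 1).toNat < seen.length) →
    (czyLoopB L seen = true ↔
      L.Nodup ∧ ∀ x ∈ L, seen.getD (x - 1).toNat false = false) := by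
  induction L with
  | nil => intro seen _; simp [czyLoopB]
  | cons x t ih =>
    intro seen hs
    obtain ⟨hx1, hxlt⟩ := hs x (List.mem_cons_self ..)
    have hget : PySem.List.pyGetD seen (x - 1) false = seen.getD (x - 1).toNat false :=
      PySem.List.pyGetD_of_nonneg seen false (by omega)
    have hset : PySem.List.pySetD seen (x - 1) true = seen.set (x - 1).toNat true :=
      PySem.List.pySetD_of_nonneg seen true (by omega)
    simp only [czyLoopB, hget, hset]
    by_cases hb : seen.getD (x - 1).toNat false = true
    · rw [if_pos hb]
      apply iff_of_false
      · simp
      · rintro ⟨_, hall⟩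
        have := hall x (List.mem_cons_self ..)
        rw [this] at hb
        cases hb
    · rw [if_neg hb]
      have hb' : seen.getD (x - 1).toNat false = false := by
        revert hb; cases seen.getD (x - 1).toNat false <;> simp
      rw [ih (seen.set (x - 1).toNat true)
        (fun y hy => by
          have := hs y (List.mem_cons_of_mem _ hy)
          simpa [List.length_set] using this)]
      have hkey : ∀ y : Int, 1 ≤ y → (y - 1).toNat < seen.length →
          (seen.set (x - 1).toNat true).getD (y - 1).toNat false
            = if y = x then true else seen.getD (y - 1).toNat false := by
        intro y hy hylt
        by_cases hyx : y = x
        · rw [if_pos hyx, hyx, List.getD_eq_getElem?_getD, List.getElem?_set_self hxlt]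
          rfl
        · rw [if_neg hyx, List.getD_eq_getElem?_getD,
            List.getElem?_set_ne (by omega : (x - 1).toNat ≠ (y - 1).toNat),
            ← List.getD_eq_getElem?_getD]
      constructor
      · rintro ⟨hnd, hall⟩
        have hxt : x ∉ t := by
          intro hmem
          have := hall x hmem
          rw [hkey x hx1 hxlt, if_pos rfl] at this
          cases this
        refine ⟨List.nodup_cons.mpr ⟨hxt, hnd⟩, ?_⟩
        intro y hy
        rcases List.mem_cons.mp hy with rfl | hy'
        · exact hb'
        · have h1 := (hs y (List.mem_cons_of_mem _ hy')).1
          have h2 := (hs y (List.mem_cons_of_mem _ hy')).2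
          have := hall y hy'
          rw [hkey y h1 h2] at this
          by_cases hyx : y = x
          · rw [if_pos hyx] at this; cases this
          · rwa [if_neg hyx] at this
      · rintro ⟨hnd, hall⟩
        obtain ⟨hxt, hnd'⟩ := List.nodup_cons.mp hnd
        refine ⟨hnd', ?_⟩
        intro y hy
        have h1 := (hs y (List.mem_cons_of_mem _ hy)).1
        have h2 := (hs y (List.mem_cons_of_mem _ hy)).2
        rw [hkey y h1 h2, if_neg (by rintro rfl; exact hxt hy)]
        exact hall y (List.mem_cons_of_mem _ hy)

-- counts all 1 on 1..n ↔ nodup, for a list of length n with elements in [1,n]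
theorem counts_iff_nodup (L : List Int) (n : Int)
    (hlen : (L.length : Int) = n)
    (hmem : ∀ x ∈ L, 1 ≤ x ∧ x ≤ n) :
    ((∀ k : Int, 1 ≤ k → k ≤ n → (L.count k : Int) = 1) ↔ L.Nodup) := by
  constructor
  · intro h
    rw [List.nodup_iff_count_le_one]
    intro a
    by_cases ha : a ∈ L
    · have hm := hmem a ha
      have := h a hm.1 hm.2
      omega
    · simp [List.count_eq_zero_of_not_mem ha]
  · intro hnd k hk1 hkn
    have hsub : L.toFinset ⊆ Finset.Icc 1 n := by
      intro a ha
      rw [List.mem_toFinset] at ha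
      exact Finset.mem_Icc.mpr (hmem a ha)
    have hcard : (Finset.Icc (1 : Int) n).card ≤ L.toFinset.card := by
      rw [Int.card_Icc, List.toFinset_card_of_nodup hnd]
      omega
    have heq : L.toFinset = Finset.Icc 1 n := Finset.eq_of_subset_of_card_le hsub hcard
    have hkL : k ∈ L := by
      rw [← List.mem_toFinset, heq]; exact Finset.mem_Icc.mpr ⟨hk1, hkn⟩
    rw [List.count_eq_one_of_mem hnd hkL]; simp

theorem tail_getD (T : List Int) (j : Nat) : T.tail.getD j 0 = T.getD (j + 1) 0 := by
  cases T with
  | nil => simp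
  | cons a t => simp [List.getD_eq_getElem?_getD]

-- main equality under a passed guard
theorem guard_case (L : List Int) (n : Int)
    (hmin : PySem.List.min? L (fun y => y) = some 1)
    (hmax : PySem.List.max? L (fun y => y) = some n)
    (hlen : (L.length : Int) = n) :
    czyLoopA (PySem.List.slice (tablicaZliczen L) (some 1) none)
      = czyLoopB L (List.replicate n.toNat false) := by
  have hlo : ∀ x ∈ L, 1 ≤ x := fun x hx => PySem.List.min?_isMin hmin x hx
  have hhi : ∀ x ∈ L, x ≤ n := fun x hx => PySem.List.max?_isMax hmax x hx
  have hn1 : 1 ≤ n := hlo n (PySem.List.max?_mem hmax)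
  have hlenW0 : ((PySem.List.pyRange 0 (n + 1) 1).map (fun _ => (0 : Int))).length
      = (n + 1).toNat := by
    unfold PySem.List.pyRange
    rw [if_neg (by norm_num : (1 : Int) ≠ 0)]
    simp only [List.length_map, List.length_range]
    split_ifs with h <;> omega
  have hTdef : tablicaZliczen L
      = L.foldl (fun W x => PySem.List.pySetD W x (PySem.List.pyGetD W x 0 + 1))
          ((PySem.List.pyRange 0 (n + 1) 1).map (fun _ => (0 : Int))) := by
    unfold tablicaZliczen
    rw [hmax]
    rfl
  have hbound : ∀ x ∈ L, 0 ≤ x ∧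
      x.toNat < ((PySem.List.pyRange 0 (n + 1) 1).map (fun _ => (0 : Int))).length := by
    intro x hx
    have := hlo x hx; have := hhi x hx
    refine ⟨by omega, ?_⟩
    rw [hlenW0]; omega
  have hTlen : (tablicaZliczen L).length = (n + 1).toNat := by
    rw [hTdef, foldl_step_length, hlenW0]
  have hTget : ∀ k : Nat, k < (n + 1).toNat →
      (tablicaZliczen L).getD k 0 = (L.count ((k : Nat) : Int) : Int) := by
    intro k hk
    rw [hTdef, counts_spec L _ hbound k (by rw [hlenW0]; omega), mapconst_getD]
    ring
  have hA : czyLoopA (PySem.List.slice (tablicaZliczen L) (some 1) none) = true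
      ↔ ∀ k : Int, 1 ≤ k → k ≤ n → (L.count k : Int) = 1 := by
    rw [PySem.List.slice_from_one, czyLoopA_eq_true_iff]
    constructor
    · intro h k hk1 hkn
      have hlt : k.toNat - 1 < (tablicaZliczen L).tail.length := by
        rw [List.length_tail, hTlen]; omega
      have heq : (tablicaZliczen L).tail[k.toNat - 1] = (L.count k : Int) := by
        rw [← List.getD_eq_getElem _ 0 hlt, tail_getD]
        have h1 : k.toNat - 1 + 1 = k.toNat := by omega
        rw [h1, hTget k.toNat (by omega)]
        have h2 : ((k.toNat : Nat) : Int) = k := by omega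
        rw [h2]
      have := h _ (List.getElem_mem hlt)
      rw [heq] at this
      rw [this]
    · intro h y hy
      obtain ⟨i, hi, hiv⟩ := List.getElem_of_mem hy
      have hi' : i + 1 < (n + 1).toNat := by
        rw [List.length_tail, hTlen] at hi; omega
      have : y = (L.count (((i + 1 : Nat)) : Int) : Int) := by
        rw [← hiv, ← List.getD_eq_getElem _ 0 hi, tail_getD, hTget (i + 1) hi']
      rw [this]
      exact h _ (by omega) (by omega)
  have hB : czyLoopB L (List.replicate n.toNat false) = true ↔ L.Nodup := by
    rw [czyLoopB_spec L _ (by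
      intro x hx
      have := hlo x hx; have := hhi x hx
      refine ⟨by omega, ?_⟩
      rw [List.length_replicate]; omega)]
    have hrep : ∀ x ∈ L, (List.replicate n.toNat false).getD (x - 1).toNat false = false := by
      intro x hx
      rw [List.getD_eq_getElem?_getD, List.getElem?_replicate]
      split_ifs <;> rfl
    constructor
    · exact fun h => h.1
    · exact fun h => ⟨h, hrep⟩
  rw [Bool.eq_iff_iff, hA, hB]
  exact counts_iff_nodup L n hlen (fun x hx => ⟨hlo x hx, hhi x hx⟩)

-- ===== VERDICT (by name: the statement is the Claim_ definition above) =====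
theorem czy_n_permutacja_spec : Claim_equal_czy_n_permutacja := by
  intro L n _ hpre
  obtain ⟨mn, hmn⟩ := Option.ne_none_iff_exists'.mp
    (fun h => hpre ((PySem.List.min?_eq_none_iff L (fun y : Int => y)).mp h))
  obtain ⟨mx, hmx⟩ := Option.ne_none_iff_exists'.mp
    (fun h => hpre ((PySem.List.max?_eq_none_iff L (fun y : Int => y)).mp h))
  unfold Spec_czy_n_permutacja czy_n_permutacja czy_n_permutacja_alt
  rw [hmn, hmx]
  dsimp only
  by_cases hg : (mn == 1 && mx == n && ((L.length : Int) == n)) = true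
  · rw [if_neg (by simp [hg]), if_neg (by simp [hg])]
    simp only [Bool.and_eq_true, beq_iff_eq] at hg
    obtain ⟨⟨h1, h2⟩, h3⟩ := hg
    rw [h1] at hmn
    rw [h2] at hmx
    exact guard_case L n hmn hmx h3
  · rw [if_pos (by simpa using hg), if_pos (by simpa using hg)]
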